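-- pv_equiv track=rewrite | github.com/simonpj/triemap-paper | code/crit_csv_to_latex.py | mark_insignificant_digits
-- ===== SOURCE A (Python) =====
-- n_digits=3
--
-- def mark_digit_insignificant(dig):
--   return '\insigdig{'+dig+'}'
--
-- def mark_insignificant_digits(val: str, significant_digs: int):
--   """
--   mark_insignificant_digits("2.43", 0) ==> (2).(4)(3)
--   mark_insignificant_digits("2.43", 1) ==> 2.(4)(3)
--   mark_insignificant_digits("2.43", 2) ==> 2.4(3)
--   mark_insignificant_digits("2.43", 3) ==> 2.43
--   mark_insignificant_digits("2.43", 4) ==> 2.43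
--   """
--   rev_s = val[::-1]
--   s = ''
--   insignificant_digs = max(0, n_digits - significant_digs)
--   for i, c in enumerate(rev_s):
--     if c == '.':
--       s = c+s
--       continue
--     assert c.isdigit(), c
--     if insignificant_digs > 0:
--       insignificant_digs = insignificant_digs-1
--       s = mark_digit_insignificant(c)+s
--     else:
--       s = c+s
--   return s
-- ===== SOURCE B (Python) =====
-- n_digits = 3
--
-- def mark_digit_insignificant(dig):
--   return '\insigdig{'+dig+'}'
--
-- def mark_insignificant_digits(val: str, significant_digs: int):
--   # Forward count-then-index pass instead of A's reverse-and-prepend countdown.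
--   total = sum(c.isdigit() for c in val)
--   k = min(max(0, n_digits - significant_digs), total)
--   threshold = total - k
--   out = []
--   j = 0
--   for c in val:
--     if c == '.':
--       out.append(c)
--     else:
--       assert c.isdigit(), c
--       if j >= threshold:
--         out.append(mark_digit_insignificant(c))
--       else:
--         out.append(c)
--       j += 1
--   return ''.join(out)
-- ===== Notes on version B (the rewrite author's own statement) =====
-- stated objective: alternative
-- what changed: Replaces A's reverse-the-string prepend loop with a countdown counter by a single forward pass: count total digits, compute the marking threshold, then wrap each digit whose running index reaches it.
import Mathlib
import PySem

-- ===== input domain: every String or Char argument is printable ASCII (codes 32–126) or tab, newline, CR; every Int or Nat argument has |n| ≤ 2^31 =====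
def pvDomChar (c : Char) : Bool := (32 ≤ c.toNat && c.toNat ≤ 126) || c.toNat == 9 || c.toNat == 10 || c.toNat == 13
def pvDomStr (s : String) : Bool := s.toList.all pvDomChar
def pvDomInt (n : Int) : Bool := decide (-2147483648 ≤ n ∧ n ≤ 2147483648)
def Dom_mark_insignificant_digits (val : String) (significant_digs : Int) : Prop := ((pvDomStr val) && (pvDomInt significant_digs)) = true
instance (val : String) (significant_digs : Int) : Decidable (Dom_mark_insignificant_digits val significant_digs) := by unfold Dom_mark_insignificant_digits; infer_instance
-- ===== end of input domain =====

-- B replaces A's reverse-then-prepend countdown by a forward count-then-index pass (objective: alternative decomposition, same cost).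

-- ===== PORT A =====
-- '\insigdig{' + dig + '}' as a list of chars (Python '\i' is a literal backslash + 'i')
def pvMark (c : Char) : List Char :=
  ['\\', 'i', 'n', 's', 'i', 'g', 'd', 'i', 'g', '{', c, '}']

-- A's loop over the reversed string, prepending to the accumulator s;
-- the assert is covered by Pre_ (inputs failing it raise AssertionError and are excluded).
def pvALoop : List Char → List Char → Int → List Char
  | [], s, _ => s
  | c :: rest, s, insig =>
    if c = '.' then pvALoop rest (c :: s) insig
    else if insig > 0 then pvALoop rest (pvMark c ++ s) (insig - 1)
    else pvALoop rest (c :: s) insig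

def mark_insignificant_digits (val : String) (significant_digs : Int) : String :=
  String.mk (pvALoop val.toList.reverse [] (max 0 (3 - significant_digs)))

-- ===== PORT B =====
-- B's forward pass: running digit index j, wrap exactly when j ≥ threshold.
def pvBLoop : List Char → Int → Int → List Char
  | [], _, _ => []
  | c :: rest, j, th =>
    if c = '.' then c :: pvBLoop rest j th
    else (if j ≥ th then pvMark c else [c]) ++ pvBLoop rest (j + 1) th

def mark_insignificant_digits_alt (val : String) (significant_digs : Int) : String :=
  let total : Int := val.toList.countP (fun c => c.isDigit)
  let k := min (max 0 (3 - significant_digs)) total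
  String.mk (pvBLoop val.toList 0 (total - k))

-- ===== PRECONDITION & SPEC =====
-- Pre_: every char is an ASCII digit or '.'; on any other char A's assert raises AssertionError.
def Pre_mark_insignificant_digits (val : String) (significant_digs : Int) : Prop :=
  val.toList.all (fun c => c.isDigit || c == '.') = true
instance (val : String) (significant_digs : Int) : Decidable (Pre_mark_insignificant_digits val significant_digs) := by unfold Pre_mark_insignificant_digits; infer_instance

def pvWitness_mark_insignificant_digits : String × Int := ("2.43", 1)

def Spec_mark_insignificant_digits (val : String) (significant_digs : Int) (out : String) : Prop := out = mark_insignificant_digits_alt val significant_digs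
instance (val : String) (significant_digs : Int) (out : String) : Decidable (Spec_mark_insignificant_digits val significant_digs out) := by unfold Spec_mark_insignificant_digits; infer_instance

-- ===== CLAIM (what is proved, stated in full; the proofs are below) =====
def Claim_equal_mark_insignificant_digits : Prop := ∀ (val : String) (significant_digs : Int), Dom_mark_insignificant_digits val significant_digs → Pre_mark_insignificant_digits val significant_digs → Spec_mark_insignificant_digits val significant_digs (mark_insignificant_digits val significant_digs)

-- ===== LEMMAS AND PROOFS =====

-- count of non-dot chars (B's digit index advances on exactly these)
def pvND (l : List Char) : Int := l.countP (fun c => !(c == '.'))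

def pvD (l : List Char) : Int := l.countP (fun c => c.isDigit)

theorem pvALoop_acc (l : List Char) : ∀ (s : List Char) (insig : Int),
    pvALoop l s insig = pvALoop l [] insig ++ s := by
  induction l with
  | nil => intro s insig; simp [pvALoop]
  | cons c rest ih =>
    intro s insig
    by_cases hc : c = '.'
    · simp only [pvALoop, hc, if_pos rfl]
      rw [ih ('.' :: s) insig, ih ['.'] insig]
      simp
    · by_cases hi : insig > 0
      · simp [pvALoop, hc, hi]
        rw [ih (pvMark c ++ s) (insig - 1), ih (pvMark c) (insig - 1)]
        simp
      · simp [pvALoop, hc, hi]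
        rw [ih (c :: s) insig, ih [c] insig]
        simp

theorem pvBLoop_id (l : List Char) : ∀ (j th : Int), pvND l + j ≤ th →
    pvBLoop l j th = l := by
  induction l with
  | nil => intro j th _; simp [pvBLoop]
  | cons c rest ih =>
    intro j th h
    by_cases hc : c = '.'
    · have hnd : pvND (c :: rest) = pvND rest := by simp [pvND, hc]
      rw [hnd] at h
      simp [pvBLoop, hc]
      exact ih j th (by omega)
    · have hnd : pvND (c :: rest) = pvND rest + 1 := by simp [pvND, hc]
      have hrest : (0:Int) ≤ pvND rest := by unfold pvND; positivity
      have hj : ¬ j ≥ th := by omega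
      simp [pvBLoop, hc, hj]
      exact ih (j + 1) th (by omega)

theorem pvBLoop_snoc (l : List Char) : ∀ (c : Char) (j th : Int),
    pvBLoop (l ++ [c]) j th =
      pvBLoop l j th ++
        (if c = '.' then [c] else if j + pvND l ≥ th then pvMark c else [c]) := by
  induction l with
  | nil =>
    intro c j th
    by_cases hc : c = '.' <;> simp [pvBLoop, pvND, hc]
  | cons a rest ih =>
    intro c j th
    by_cases ha : a = '.'
    · have h1 : pvND (a :: rest) = pvND rest := by simp [pvND, ha]
      rw [h1]
      simp only [List.cons_append, pvBLoop, ha, if_pos rfl]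
      rw [ih c j th]
      simp
    · have h1 : pvND (a :: rest) = pvND rest + 1 := by simp [pvND, ha]
      rw [h1]
      simp only [List.cons_append, pvBLoop, if_neg ha]
      rw [ih c (j + 1) th, show j + 1 + pvND rest = j + (pvND rest + 1) by ring]
      simp [List.append_assoc]

theorem pvD_nonneg (l : List Char) : (0:Int) ≤ pvD l := by
  unfold pvD; positivity

theorem pvND_eq_pvD (l : List Char) (h : ∀ c ∈ l, c.isDigit ∨ c = '.') :
    pvND l = pvD l := by
  unfold pvND pvD
  congr 1
  apply List.countP_congr
  intro c hc
  rcases h c hc with hd | hdot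
  · have hne : ¬ (c = '.') := by
      intro he; rw [he] at hd; simp [Char.isDigit] at hd
    simp [hd, hne]
  · simp [hdot, Char.isDigit]

theorem pvMain (cs : List Char) (hall : ∀ c ∈ cs, c.isDigit ∨ c = '.') :
    ∀ (insig : Int), 0 ≤ insig →
    pvALoop cs.reverse [] insig = pvBLoop cs 0 (pvD cs - min insig (pvD cs)) := by
  induction cs using List.reverseRecOn with
  | nil => intro insig _; simp [pvALoop, pvBLoop, pvD]
  | append_singleton cs c ih =>
    have hall' : ∀ x ∈ cs, x.isDigit ∨ x = '.' := fun x hx => hall x (by simp [hx])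
    have hc := hall c (by simp)
    have hnd := pvND_eq_pvD cs hall'
    have hDnn := pvD_nonneg cs
    intro insig hins
    rw [List.reverse_append]
    simp only [List.reverse_singleton, List.singleton_append]
    rw [pvBLoop_snoc, hnd]
    by_cases hdot : c = '.'
    · subst hdot
      have hD : pvD (cs ++ ['.']) = pvD cs := by
        simp [pvD, List.countP_append]
      rw [hD]
      simp only [pvALoop, if_pos rfl]
      rw [pvALoop_acc, ih hall' insig hins]
      simp
    · have hdig : c.isDigit := hc.resolve_right hdot
      have hD : pvD (cs ++ [c]) = pvD cs + 1 := by
        simp [pvD, List.countP_append, hdig]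
      rw [hD]
      by_cases hi : insig > 0
      · simp only [pvALoop, if_neg hdot, if_pos hi]
        rw [pvALoop_acc, ih hall' (insig - 1) (by omega)]
        have hth : pvD cs - min (insig - 1) (pvD cs)
            = pvD cs + 1 - min insig (pvD cs + 1) := by omega
        have hcond : (0 : Int) + pvD cs ≥ pvD cs + 1 - min insig (pvD cs + 1) := by
          omega
        rw [hth, if_pos hcond]
        simp
      · have hiz : insig = 0 := by omega
        simp only [pvALoop, if_neg hdot, if_neg hi]
        rw [pvALoop_acc, ih hall' insig hins, hiz]
        have h1 : pvD cs - min 0 (pvD cs) = pvD cs := by omega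
        have h2 : pvD cs + 1 - min 0 (pvD cs + 1) = pvD cs + 1 := by omega
        have hcond : ¬ ((0 : Int) + pvD cs ≥ pvD cs + 1) := by omega
        rw [h1, h2]
        rw [pvBLoop_id cs 0 (pvD cs) (by omega), pvBLoop_id cs 0 (pvD cs + 1) (by omega)]
        rw [if_neg hcond]

-- ===== VERDICT (by name: the statement is the Claim_ definition above) =====
theorem mark_insignificant_digits_spec : Claim_equal_mark_insignificant_digits := by
  intro val significant_digs _hdom hpre
  have hall : ∀ c ∈ val.toList, c.isDigit ∨ c = '.' := by
    intro c hc
    have h := List.all_eq_true.mp hpre c hc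
    simpa using h
  unfold Spec_mark_insignificant_digits mark_insignificant_digits mark_insignificant_digits_alt
  exact congrArg String.mk
    (pvMain val.toList hall (max 0 (3 - significant_digs)) (le_max_left _ _))
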